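-- pv_equiv track=rewrite | github.com/endomorphosis/ipfs_datasets_py | ipfs_datasets_py/processors/legal_scrapers/federal_scrapers/us_code_scraper.py | _normalize_titles
-- ===== SOURCE A (Python) =====
-- from typing import Any, Dict, Iterator, List, Optional
--
-- US_CODE_TITLES = {
--     "1": "General Provisions",
--     "2": "The Congress",
--     "3": "The President",
--     "4": "Flag and Seal, Seat of Government, and the States",
--     "5": "Government Organization and Employees",
--     "6": "Domestic Security",
--     "7": "Agriculture",
--     "8": "Aliens and Nationality",
--     "9": "Arbitration",
--     "10": "Armed Forces",
--     "11": "Bankruptcy",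
--     "12": "Banks and Banking",
--     "13": "Census",
--     "14": "Coast Guard",
--     "15": "Commerce and Trade",
--     "16": "Conservation",
--     "17": "Copyrights",
--     "18": "Crimes and Criminal Procedure",
--     "19": "Customs Duties",
--     "20": "Education",
--     "21": "Food and Drugs",
--     "22": "Foreign Relations and Intercourse",
--     "23": "Highways",
--     "24": "Hospitals and Asylums",
--     "25": "Indians",
--     "26": "Internal Revenue Code",
--     "27": "Intoxicating Liquors",
--     "28": "Judiciary and Judicial Procedure",
--     "29": "Labor",
--     "30": "Mineral Lands and Mining",
--     "31": "Money and Finance",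
--     "32": "National Guard",
--     "33": "Navigation and Navigable Waters",
--     "34": "Crime Control and Law Enforcement",
--     "35": "Patents",
--     "36": "Patriotic and National Observances, Ceremonies, and Organizations",
--     "37": "Pay and Allowances of the Uniformed Services",
--     "38": "Veterans' Benefits",
--     "39": "Postal Service",
--     "40": "Public Buildings, Property, and Works",
--     "41": "Public Contracts",
--     "42": "The Public Health and Welfare",
--     "43": "Public Lands",
--     "44": "Public Printing and Documents",
--     "45": "Railroads",
--     "46": "Shipping",
--     "47": "Telecommunications",
--     "48": "Territories and Insular Possessions",
--     "49": "Transportation",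
--     "50": "War and National Defense",
--     "51": "National and Commercial Space Programs",
--     "52": "Voting and Elections",
--     "54": "National Park Service and Related Programs",
-- }
--
-- def _title_sort_key(title: str) -> int:
--     try:
--         return int(str(title))
--     except Exception:
--         return 10**9
--
-- def _normalize_titles(titles: Optional[List[str]]) -> List[str]:
--     if titles is None or "all" in [str(t).lower() for t in titles]:
--         return sorted(list(US_CODE_TITLES.keys()), key=_title_sort_key)
--     out: List[str] = []
--     for value in titles:
--         key = str(value).strip()
--         if key in US_CODE_TITLES:
--             out.append(key)
--     return sorted(list(dict.fromkeys(out)), key=_title_sort_key)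
-- ===== SOURCE B (Python) =====
-- from typing import List, Optional
--
-- from typing import Any, Dict, Iterator
--
-- US_CODE_TITLES = {
--     "1": "General Provisions",
--     "2": "The Congress",
--     "3": "The President",
--     "4": "Flag and Seal, Seat of Government, and the States",
--     "5": "Government Organization and Employees",
--     "6": "Domestic Security",
--     "7": "Agriculture",
--     "8": "Aliens and Nationality",
--     "9": "Arbitration",
--     "10": "Armed Forces",
--     "11": "Bankruptcy",
--     "12": "Banks and Banking",
--     "13": "Census",
--     "14": "Coast Guard",
--     "15": "Commerce and Trade",
--     "16": "Conservation",
--     "17": "Copyrights",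
--     "18": "Crimes and Criminal Procedure",
--     "19": "Customs Duties",
--     "20": "Education",
--     "21": "Food and Drugs",
--     "22": "Foreign Relations and Intercourse",
--     "23": "Highways",
--     "24": "Hospitals and Asylums",
--     "25": "Indians",
--     "26": "Internal Revenue Code",
--     "27": "Intoxicating Liquors",
--     "28": "Judiciary and Judicial Procedure",
--     "29": "Labor",
--     "30": "Mineral Lands and Mining",
--     "31": "Money and Finance",
--     "32": "National Guard",
--     "33": "Navigation and Navigable Waters",
--     "34": "Crime Control and Law Enforcement",
--     "35": "Patents",
--     "36": "Patriotic and National Observances, Ceremonies, and Organizations",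
--     "37": "Pay and Allowances of the Uniformed Services",
--     "38": "Veterans' Benefits",
--     "39": "Postal Service",
--     "40": "Public Buildings, Property, and Works",
--     "41": "Public Contracts",
--     "42": "The Public Health and Welfare",
--     "43": "Public Lands",
--     "44": "Public Printing and Documents",
--     "45": "Railroads",
--     "46": "Shipping",
--     "47": "Telecommunications",
--     "48": "Territories and Insular Possessions",
--     "49": "Transportation",
--     "50": "War and National Defense",
--     "51": "National and Commercial Space Programs",
--     "52": "Voting and Elections",
--     "54": "National Park Service and Related Programs",
-- }
--
--
-- def _normalize_titles(titles: Optional[List[str]]) -> List[str]: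
--     # The master dict is already in numeric order, so no sort is needed:
--     # filter its key sequence by the set of normalized requested titles.
--     if titles is None or "all" in {str(t).lower() for t in titles}:
--         return list(US_CODE_TITLES)
--     wanted = {str(v).strip() for v in titles}
--     return [k for k in US_CODE_TITLES if k in wanted]
-- ===== Notes on version B (the rewrite author's own statement) =====
-- stated objective: simpler
-- what changed: B drops A's collect-then-dedup-then-numeric-sort pipeline: it builds a set of stripped requested titles once and filters the master US_CODE_TITLES key sequence (already in numeric order) against it, so no sort and no dedup pass remain.
import Mathlib
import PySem

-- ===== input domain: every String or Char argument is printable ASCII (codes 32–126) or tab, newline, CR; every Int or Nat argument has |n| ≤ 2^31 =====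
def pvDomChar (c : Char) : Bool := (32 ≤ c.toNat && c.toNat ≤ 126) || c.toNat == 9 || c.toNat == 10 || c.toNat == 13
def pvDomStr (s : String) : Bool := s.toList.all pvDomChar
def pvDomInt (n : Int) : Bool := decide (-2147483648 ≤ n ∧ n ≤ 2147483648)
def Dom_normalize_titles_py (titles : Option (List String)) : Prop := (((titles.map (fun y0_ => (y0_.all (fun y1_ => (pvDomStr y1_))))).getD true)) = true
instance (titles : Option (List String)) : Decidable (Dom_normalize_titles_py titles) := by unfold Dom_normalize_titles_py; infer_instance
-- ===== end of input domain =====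

-- B replaces A's "collect, dedup, numeric sort" pass by a single filter of the
-- pre-ordered master key table against a set of normalized requested titles (simpler; no sort).

-- keys of US_CODE_TITLES, in the dict's insertion order
def usCodeKeys : List String := ["1", "2", "3", "4", "5", "6", "7", "8", "9", "10", "11", "12", "13", "14", "15", "16", "17", "18", "19", "20", "21", "22", "23", "24", "25", "26", "27", "28", "29", "30", "31", "32", "33", "34", "35", "36", "37", "38", "39", "40", "41", "42", "43", "44", "45", "46", "47", "48", "49", "50", "51", "52", "54"]

-- ===== PORT A =====
def titleSortKey (title : String) : Int :=
  match PySem.Int.ofStr? title with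
  | some n => n
  | none => 10 ^ 9

def normalize_titles_py (titles : Option (List String)) : List String :=
  match titles with
  | none => PySem.List.sorted usCodeKeys titleSortKey false
  | some ts =>
    if ((ts.map (fun t => PySem.Str.lower t)).contains "all") then
      PySem.List.sorted usCodeKeys titleSortKey false
    else
      let out : List String := ts.foldl (fun out value =>
        let key := PySem.Str.strip value
        if usCodeKeys.contains key then out ++ [key] else out) []
      PySem.List.sorted (PySem.List.dedup out) titleSortKey false

-- ===== PORT B =====
def normalize_titles_py_alt (titles : Option (List String)) : List String :=
  match titles with
  | none => usCodeKeys
  | some ts =>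
    if ((ts.map (fun t => PySem.Str.lower t)).contains "all") then
      usCodeKeys
    else
      let wanted : PySem.Set String := PySem.Set.ofList (ts.map (fun v => PySem.Str.strip v))
      usCodeKeys.filter (fun k => PySem.Set.contains wanted k)

-- ===== PRECONDITION & SPEC =====
def Spec_normalize_titles_py (titles : Option (List String)) (out : List String) : Prop := out = normalize_titles_py_alt titles
instance (titles : Option (List String)) (out : List String) : Decidable (Spec_normalize_titles_py titles out) := by unfold Spec_normalize_titles_py; infer_instance

-- ===== CLAIM (what is proved, stated in full; the proofs are below) =====
def Claim_equal_normalize_titles_py : Prop := ∀ (titles : Option (List String)), Dom_normalize_titles_py titles → Spec_normalize_titles_py titles (normalize_titles_py titles)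

-- ===== LEMMAS AND PROOFS =====

-- the master key list is strictly increasing under A's sort key
theorem usCodeKeys_pairwise : usCodeKeys.Pairwise (fun a b => titleSortKey a < titleSortKey b) := by
  decide

theorem usCodeKeys_nodup : usCodeKeys.Nodup := by decide

-- sorting the full key list by the numeric key is the identity
theorem sorted_usCodeKeys : PySem.List.sorted usCodeKeys titleSortKey false = usCodeKeys := by
  exact PySem.List.sorted_eq_self_of_pairwise usCodeKeys titleSortKey (usCodeKeys_pairwise.imp (fun h => le_of_lt h))

-- A's accumulation loop is a filter of the stripped titles
theorem out_loop_eq (ts : List String) :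
    ts.foldl (fun out value =>
        let key := PySem.Str.strip value
        if usCodeKeys.contains key then out ++ [key] else out) [] =
      (ts.map (fun v => PySem.Str.strip v)).filter (fun k => usCodeKeys.contains k) := by
  have h := PySem.List.foldl_append_if_eq_filter (fun k => usCodeKeys.contains k)
    (ts.map (fun v => PySem.Str.strip v)) ([] : List String)
  rw [List.foldl_map] at h
  simpa using h

theorem main_case (ts : List String) :
    PySem.List.sorted
      (PySem.List.dedup ((ts.map (fun v => PySem.Str.strip v)).filter (fun k => usCodeKeys.contains k)))
      titleSortKey false =
    usCodeKeys.filter (fun k => PySem.Set.contains (PySem.Set.ofList (ts.map (fun v => PySem.Str.strip v))) k) := by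
  refine PySem.List.sorted_eq_of_perm_of_pairwise_lt _ _ _ ?_ (usCodeKeys_pairwise.filter _)
  refine (List.perm_ext_iff_of_nodup (List.Nodup.filter _ usCodeKeys_nodup)
    (PySem.List.nodup_dedup _)).mpr ?_
  intro k
  simp [List.mem_filter, PySem.Set.contains, PySem.Set.mem_ofList, and_comm]

-- ===== VERDICT (by name: the statement is the Claim_ definition above) =====
theorem normalize_titles_py_spec : Claim_equal_normalize_titles_py := by
  intro titles _
  unfold Spec_normalize_titles_py normalize_titles_py normalize_titles_py_alt
  match titles with
  | none => exact sorted_usCodeKeys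
  | some ts =>
    by_cases h : (ts.map (fun t => PySem.Str.lower t)).contains "all"
    · simp only [h, if_true]
      exact sorted_usCodeKeys
    · simp only [h]
      rw [out_loop_eq]
      exact main_case ts
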